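-- pv_equiv track=rewrite | github.com/ShubhamX90/rag_reason | sft_inference_pipeline_v2/code/data/prepare_data.py | ids_by_verdict
-- ===== SOURCE A (Python) =====
-- def ids_by_verdict(arr):
--     irr, sup, psup = [], [], []
--     for x in arr:
--         did = x["doc_id"]
--         v = (x.get("verdict") or "").strip()
--         if v == "supports":
--             sup.append(did)
--         elif v == "partially supports":
--             psup.append(did)
--         else:
--             irr.append(did)
--     return irr, sup, psup
-- ===== SOURCE B (Python) =====
-- def ids_by_verdict(arr):
--     def v(x):
--         return (x.get("verdict") or "").strip()
--     sup = [x["doc_id"] for x in arr if v(x) == "supports"]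
--     psup = [x["doc_id"] for x in arr if v(x) == "partially supports"]
--     irr = [x["doc_id"] for x in arr if v(x) not in ("supports", "partially supports")]
--     return irr, sup, psup
-- ===== Notes on version B (the rewrite author's own statement) =====
-- stated objective: alternative
-- what changed: Replaces the single accumulator loop with three-branch dispatch by three independent filtering comprehensions over arr, one per output list.
import Mathlib
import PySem

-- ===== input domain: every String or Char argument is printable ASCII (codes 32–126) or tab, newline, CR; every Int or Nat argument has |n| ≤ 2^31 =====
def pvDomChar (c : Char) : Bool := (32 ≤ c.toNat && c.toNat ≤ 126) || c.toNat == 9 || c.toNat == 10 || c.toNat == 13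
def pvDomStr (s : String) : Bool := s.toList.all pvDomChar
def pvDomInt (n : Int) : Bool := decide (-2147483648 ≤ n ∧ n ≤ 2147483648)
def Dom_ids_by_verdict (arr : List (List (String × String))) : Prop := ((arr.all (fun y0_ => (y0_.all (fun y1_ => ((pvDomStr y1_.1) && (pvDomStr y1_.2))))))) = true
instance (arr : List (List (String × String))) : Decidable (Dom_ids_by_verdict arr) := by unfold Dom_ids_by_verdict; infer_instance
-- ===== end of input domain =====

-- B replaces A's single three-branch partitioning loop with three independent filtering passes; alternative decomposition, same cost.


-- dict lookup (first match); x[k] raises KeyError when absent — Pre_ excludes that, so getD "" is only read inside Pre_ where the key exists (for "doc_id"), and for "verdict" matches `x.get("verdict") or ""` exactly (missing or "" both give "")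
def pvGetStr (x : List (String × String)) (k : String) : String :=
  ((x.find? (fun p => p.1 == k)).map (·.2)).getD ""

-- ===== PORT A =====
def pvStepA (acc : List String × List String × List String) (x : List (String × String)) :
    List String × List String × List String :=
  let did := pvGetStr x "doc_id"
  let v := PySem.Str.strip (pvGetStr x "verdict")
  if v == "supports" then (acc.1, acc.2.1 ++ [did], acc.2.2)
  else if v == "partially supports" then (acc.1, acc.2.1, acc.2.2 ++ [did])
  else (acc.1 ++ [did], acc.2.1, acc.2.2)

def ids_by_verdict (arr : List (List (String × String))) : List String × List String × List String :=
  arr.foldl pvStepA ([], [], [])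

-- ===== PORT B =====
def pvVerd (x : List (String × String)) : String := PySem.Str.strip (pvGetStr x "verdict")

def ids_by_verdict_alt (arr : List (List (String × String))) : List String × List String × List String :=
  let sup := (arr.filter (fun x => pvVerd x == "supports")).map (fun x => pvGetStr x "doc_id")
  let psup := (arr.filter (fun x => pvVerd x == "partially supports")).map (fun x => pvGetStr x "doc_id")
  let irr := (arr.filter (fun x => !(pvVerd x == "supports") && !(pvVerd x == "partially supports"))).map (fun x => pvGetStr x "doc_id")
  (irr, sup, psup)

-- ===== PRECONDITION & SPEC =====
-- Pre_ excludes exactly the inputs where A raises KeyError: some entry lacks a "doc_id" key.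
def Pre_ids_by_verdict (arr : List (List (String × String))) : Prop :=
  arr.all (fun x => x.any (fun p => p.1 == "doc_id")) = true
instance (arr : List (List (String × String))) : Decidable (Pre_ids_by_verdict arr) := by unfold Pre_ids_by_verdict; infer_instance
def pvWitness_ids_by_verdict : (List (List (String × String))) :=
  [[("doc_id", "d1"), ("verdict", " supports ")], [("doc_id", "d2")]]

def Spec_ids_by_verdict (arr : List (List (String × String))) (out : List String × List String × List String) : Prop := out = ids_by_verdict_alt arr
instance (arr : List (List (String × String))) (out : List String × List String × List String) : Decidable (Spec_ids_by_verdict arr out) := by unfold Spec_ids_by_verdict; infer_instance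

-- ===== CLAIM (what is proved, stated in full; the proofs are below) =====
def Claim_equal_ids_by_verdict : Prop := ∀ (arr : List (List (String × String))), Dom_ids_by_verdict arr → Pre_ids_by_verdict arr → Spec_ids_by_verdict arr (ids_by_verdict arr)

-- ===== LEMMAS AND PROOFS =====
theorem ids_by_verdict_foldl (arr : List (List (String × String)))
    (i s p : List String) :
    arr.foldl pvStepA (i, s, p) =
    (i ++ (arr.filter (fun x => !(pvVerd x == "supports") && !(pvVerd x == "partially supports"))).map (fun x => pvGetStr x "doc_id"),
     s ++ (arr.filter (fun x => pvVerd x == "supports")).map (fun x => pvGetStr x "doc_id"),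
     p ++ (arr.filter (fun x => pvVerd x == "partially supports")).map (fun x => pvGetStr x "doc_id")) := by
  induction arr generalizing i s p with
  | nil => simp
  | cons x xs ih =>
    rw [List.foldl_cons]
    by_cases h1 : pvVerd x == "supports"
    · have h1' : pvVerd x = "supports" := by simpa using h1
      have h2' : ¬ pvVerd x = "partially supports" := by rw [h1']; decide
      have hs : pvStepA (i, s, p) x = (i, s ++ [pvGetStr x "doc_id"], p) := by
        simp [pvStepA, pvVerd] at *; simp [h1']
      rw [hs, ih]
      simp [List.filter_cons, h1', h2']
    · by_cases h2 : pvVerd x == "partially supports"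
      · have hs : pvStepA (i, s, p) x = (i, s, p ++ [pvGetStr x "doc_id"]) := by
          simp [pvVerd] at h1 h2; simp [pvStepA, h1, h2]
        rw [hs, ih]
        simp [List.filter_cons, h1, h2]
      · have hs : pvStepA (i, s, p) x = (i ++ [pvGetStr x "doc_id"], s, p) := by
          simp [pvVerd] at h1 h2; simp [pvStepA, h1, h2]
        rw [hs, ih]
        simp [List.filter_cons, h1, h2]

-- ===== VERDICT (by name: the statement is the Claim_ definition above) =====
theorem ids_by_verdict_spec : Claim_equal_ids_by_verdict := by
  intro arr _ _
  show ids_by_verdict arr = ids_by_verdict_alt arr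
  unfold ids_by_verdict ids_by_verdict_alt
  rw [ids_by_verdict_foldl]
  simp
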